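-- pv_equiv track=rewrite | github.com/trolen/advent-of-code | 2018/day06/day06.py | find_area_within_distance
-- ===== SOURCE A (Python) =====
-- def manhattan_distance(p1, p2):
--     n1 = abs(p2[0] - p1[0])
--     n2 = abs(p2[1] - p1[1])
--     return n1 + n2
--
-- def find_area_within_distance(points, grid, dist):
--     result = 0
--     len_y = len(grid)
--     for y in range(0, len_y):
--         len_x = len(grid[y])
--         for x in range(0, len_x):
--             distances = []
--             for point in points:
--                 distances.append(manhattan_distance((x,y), point))
--             if sum(distances) < dist:
--                 result += 1
--     return result
-- ===== SOURCE B (Python) =====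
-- def find_area_within_distance(points, grid, dist):
--     # Separate the Manhattan sum into an x-part and a y-part, precomputed
--     # once per row index and per column index.
--     row_cost = [sum(abs(y - py) for _, py in points) for y in range(len(grid))]
--     width = max((len(row) for row in grid), default=0)
--     col_cost = [sum(abs(x - px) for px, _ in points) for x in range(width)]
--     result = 0
--     for y, row in enumerate(grid):
--         budget = dist - row_cost[y]
--         result += sum(1 for c in col_cost[:len(row)] if c < budget)
--     return result
-- ===== Notes on version B (the rewrite author's own statement) =====
-- stated objective: faster
-- what changed: Splits the Manhattan-distance sum into independent x and y parts precomputed once per column and per row, so the per-cell work drops from a scan over all points to one addition and comparison.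
import Mathlib
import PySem

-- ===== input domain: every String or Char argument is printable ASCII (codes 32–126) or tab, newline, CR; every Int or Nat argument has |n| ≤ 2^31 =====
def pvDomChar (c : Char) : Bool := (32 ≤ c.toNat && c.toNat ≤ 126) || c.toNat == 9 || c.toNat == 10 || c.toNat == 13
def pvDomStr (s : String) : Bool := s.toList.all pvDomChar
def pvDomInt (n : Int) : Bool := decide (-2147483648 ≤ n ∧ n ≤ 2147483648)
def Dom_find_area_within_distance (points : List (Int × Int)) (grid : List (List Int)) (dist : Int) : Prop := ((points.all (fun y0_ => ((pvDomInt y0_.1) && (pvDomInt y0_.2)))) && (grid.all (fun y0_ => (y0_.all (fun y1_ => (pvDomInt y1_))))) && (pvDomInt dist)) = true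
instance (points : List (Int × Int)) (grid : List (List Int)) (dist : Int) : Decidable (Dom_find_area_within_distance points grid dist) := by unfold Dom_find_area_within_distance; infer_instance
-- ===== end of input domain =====

-- B splits the Manhattan-distance sum into x- and y-parts precomputed per column and per row
-- (objective: faster — per-cell work drops from a scan over all points to one add + compare).

-- ===== PORT A =====
def manhattan_distance (p1 p2 : Int × Int) : Int :=
  let n1 := |p2.1 - p1.1|
  let n2 := |p2.2 - p1.2|
  n1 + n2

def find_area_within_distance (points : List (Int × Int)) (grid : List (List Int)) (dist : Int) : Int :=
  let len_y : Int := grid.length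
  (PySem.List.pyRange 0 len_y 1).foldl (fun result y =>
    let row := PySem.List.pyGetD grid y []   -- grid[y]; y is always in range here
    let len_x : Int := row.length
    (PySem.List.pyRange 0 len_x 1).foldl (fun result x =>
      let distances := points.foldl (fun ds point => ds ++ [manhattan_distance (x, y) point]) []
      if distances.sum < dist then result + 1 else result) result) 0

-- ===== PORT B =====
def find_area_within_distance_alt (points : List (Int × Int)) (grid : List (List Int)) (dist : Int) : Int :=
  let row_cost := (PySem.List.pyRange 0 (grid.length : Int) 1).map
      (fun y => (points.map (fun p => |y - p.2|)).sum)
  -- max(..., default=0): row lengths are ≥ 0, so a fold of max starting at 0 is exact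
  let width : Int := grid.foldl (fun m row => max m (row.length : Int)) 0
  let col_cost := (PySem.List.pyRange 0 width 1).map
      (fun x => (points.map (fun p => |x - p.1|)).sum)
  (PySem.List.enumerate grid 0).foldl (fun result yr =>
    let budget := dist - PySem.List.pyGetD row_cost yr.1 0   -- row_cost[y]; y always in range
    result + (((col_cost.take yr.2.length).countP (fun c => decide (c < budget))) : Int)) 0

-- ===== PRECONDITION & SPEC =====
def Spec_find_area_within_distance (points : List (Int × Int)) (grid : List (List Int)) (dist : Int) (out : Int) : Prop := out = find_area_within_distance_alt points grid dist
instance (points : List (Int × Int)) (grid : List (List Int)) (dist : Int) (out : Int) : Decidable (Spec_find_area_within_distance points grid dist out) := by unfold Spec_find_area_within_distance; infer_instance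

-- ===== CLAIM (what is proved, stated in full; the proofs are below) =====
def Claim_equal_find_area_within_distance : Prop := ∀ (points : List (Int × Int)) (grid : List (List Int)) (dist : Int), Dom_find_area_within_distance points grid dist → Spec_find_area_within_distance points grid dist (find_area_within_distance points grid dist)

-- ===== LEMMAS AND PROOFS =====

def pvColf (points : List (Int × Int)) (x : Int) : Int := (points.map (fun p => |x - p.1|)).sum
def pvRowf (points : List (Int × Int)) (y : Int) : Int := (points.map (fun p => |y - p.2|)).sum

-- the canonical form both ports are reduced to
def pvRef (points : List (Int × Int)) (grid : List (List Int)) (dist : Int) : Int :=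
  (PySem.List.enumerate grid 0).foldl (fun r yr =>
    r + (((PySem.List.pyRange 0 (yr.2.length : Int) 1).countP
          (fun x => decide (pvColf points x + pvRowf points yr.1 < dist))) : Int)) 0

lemma pvCost_split (points : List (Int × Int)) (x y : Int) :
    (points.map (fun p => manhattan_distance (x, y) p)).sum = pvColf points x + pvRowf points y := by
  induction points with
  | nil => simp [pvColf, pvRowf]
  | cons p ps ih =>
    simp only [List.map_cons, List.sum_cons, pvColf, pvRowf] at *
    simp [manhattan_distance, abs_sub_comm]
    ring

lemma pv_le_foldl_max_init (l : List (List Int)) (m : Int) :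
    m ≤ l.foldl (fun m r => max m (r.length : Int)) m := by
  induction l generalizing m with
  | nil => simp
  | cons r rs ih => exact le_trans (le_max_left _ _) (ih _)

lemma pv_mem_le_foldl_max (l : List (List Int)) (row : List Int) (h : row ∈ l) (m : Int) :
    (row.length : Int) ≤ l.foldl (fun m r => max m (r.length : Int)) m := by
  induction l generalizing m with
  | nil => cases h
  | cons r rs ih =>
    rcases List.mem_cons.mp h with h | h
    · subst h
      exact le_trans (le_max_right _ _) (pv_le_foldl_max_init _ _)
    · exact ih h _

lemma pvA_eq_ref (points : List (Int × Int)) (grid : List (List Int)) (dist : Int) :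
    find_area_within_distance points grid dist = pvRef points grid dist := by
  unfold find_area_within_distance pvRef
  rw [PySem.List.enumerate_eq_map_pyRange grid ([] : List Int), List.foldl_map]
  apply PySem.List.foldl_congr_mem
  intro acc y _hy
  simp only
  rw [PySem.List.foldl_congr_mem (g := fun r x =>
        if pvColf points x + pvRowf points y < dist then r + 1 else r)]
  · rw [PySem.List.foldl_ite_add_one]
  · intro r x _hx
    rw [PySem.List.foldl_append_singleton_eq_map, List.nil_append, pvCost_split]

lemma pvB_eq_ref (points : List (Int × Int)) (grid : List (List Int)) (dist : Int) :
    find_area_within_distance_alt points grid dist = pvRef points grid dist := by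
  unfold find_area_within_distance_alt pvRef
  apply PySem.List.foldl_congr_mem
  intro acc yr hmem
  rcases (PySem.List.mem_enumerate_iff _ _ _).mp hmem with ⟨k, hk, rfl⟩
  simp only [zero_add]
  have hrow : grid[k] ∈ grid := List.getElem_mem hk
  have hwidth : ((grid[k] : List Int).length : Int) ≤
      grid.foldl (fun m row => max m (row.length : Int)) 0 := pv_mem_le_foldl_max _ _ hrow 0
  -- row_cost[k] = pvRowf k
  rw [PySem.List.pyGetD_map_pyRange_of_nonneg _ _ _ _ (by exact_mod_cast Int.natCast_nonneg k)
        (by exact_mod_cast hk)]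
  -- col_cost.take L = (pyRange 0 L 1).map colf
  rw [PySem.List.pyRange_one_append 0 ((grid[k] : List Int).length : Int)
        (grid.foldl (fun m row => max m (row.length : Int)) 0)
        (by exact_mod_cast Int.natCast_nonneg _) hwidth,
      List.map_append]
  rw [List.take_left' (by simp [PySem.List.length_pyRange_one])]
  rw [List.countP_map]
  congr 1
  norm_cast
  apply List.countP_congr
  intro x _
  simp only [Function.comp_apply, decide_eq_true_eq, pvColf, pvRowf]
  constructor <;> intro h <;> omega

-- ===== VERDICT (by name: the statement is the Claim_ definition above) =====
theorem find_area_within_distance_spec : Claim_equal_find_area_within_distance := by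
  intro points grid dist _
  unfold Spec_find_area_within_distance
  rw [pvA_eq_ref, pvB_eq_ref]
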